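-- pv_equiv track=rewrite | github.com/beautistart/zulong | zulong/skill_packs/packs/autogpt_planner/planner.py | rank_priorities
-- ===== SOURCE A (Python) =====
-- from typing import Dict, Any, List, Optional
--
-- def rank_priorities(subtasks: List[Dict[str, Any]]) -> List[Dict[str, Any]]:
--     """对子任务进行优先级排序
--
--     Args:
--         subtasks: 子任务列表
--
--     Returns:
--         排序后的子任务列表（按优先级从高到低）
--     """
--     # 简单规则排序：
--     # 1. 信息收集类任务优先级最高
--     # 2. 分析计算类其次
--     # 3. 输出生成类最后
--
--     priority_order = {
--         "search": 1, "gather": 1, "collect": 1, "fetch": 1,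
--         "analyze": 2, "calculate": 2, "compute": 2, "process": 2,
--         "generate": 3, "write": 3, "create": 3, "output": 3,
--     }
--
--     def get_priority(task: Dict) -> int:
--         task_desc = task.get("task", "").lower()
--         tool_hint = task.get("tool_hint", "").lower()
--         combined = task_desc + " " + tool_hint
--
--         for keyword, priority in priority_order.items():
--             if keyword in combined:
--                 return priority
--         return 2  # 默认中等优先级
--
--     return sorted(subtasks, key=get_priority)
-- ===== SOURCE B (Python) =====
-- from typing import Dict, Any, List
--
-- GROUPS = (
--     (1, ("search", "gather", "collect", "fetch")),
--     (2, ("analyze", "calculate", "compute", "process")),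
--     (3, ("generate", "write", "create", "output")),
-- )
--
-- def _priority(task: Dict) -> int:
--     combined = task.get("task", "").lower() + " " + task.get("tool_hint", "").lower()
--     for p, keywords in GROUPS:
--         if any(kw in combined for kw in keywords):
--             return p
--     return 2
--
-- def rank_priorities(subtasks: List[Dict[str, Any]]) -> List[Dict[str, Any]]:
--     return ([t for t in subtasks if _priority(t) == 1]
--             + [t for t in subtasks if _priority(t) == 2]
--             + [t for t in subtasks if _priority(t) == 3])
-- ===== Notes on version B (the rewrite author's own statement) =====
-- stated objective: alternative
-- what changed: Replaces the stable comparison sort keyed by per-keyword scanning of a flat dict with three staged filter passes (one per priority level, keywords stored as grouped tuples) whose results are concatenated; stability of the sort makes the two outputs identical.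
import Mathlib
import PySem

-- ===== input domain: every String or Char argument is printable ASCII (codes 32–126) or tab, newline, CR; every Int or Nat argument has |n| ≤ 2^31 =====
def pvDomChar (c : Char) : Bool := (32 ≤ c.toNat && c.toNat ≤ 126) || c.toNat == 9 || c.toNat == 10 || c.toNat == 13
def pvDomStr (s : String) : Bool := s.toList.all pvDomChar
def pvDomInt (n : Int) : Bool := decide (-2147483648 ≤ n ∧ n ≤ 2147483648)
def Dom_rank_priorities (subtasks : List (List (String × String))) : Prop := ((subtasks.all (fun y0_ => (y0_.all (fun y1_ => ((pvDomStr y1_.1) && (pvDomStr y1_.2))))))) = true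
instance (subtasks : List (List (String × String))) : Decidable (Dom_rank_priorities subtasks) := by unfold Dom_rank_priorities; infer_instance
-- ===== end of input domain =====

-- B replaces the stable comparison sort with three staged filter passes over a grouped keyword table.

-- ===== PORT A =====
-- the literal priority_order dict (insertion order preserved)
def pvPriorityOrder : List (String × Int) :=
  [("search", 1), ("gather", 1), ("collect", 1), ("fetch", 1),
   ("analyze", 2), ("calculate", 2), ("compute", 2), ("process", 2),
   ("generate", 3), ("write", 3), ("create", 3), ("output", 3)]

-- the 'for keyword, priority in priority_order.items(): if keyword in combined: return priority' loop
def pvFirstMatch : List (String × Int) → String → Int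
  | [], _ => 2
  | (kw, p) :: rest, combined =>
      if PySem.Str.isIn kw combined then p else pvFirstMatch rest combined

-- A's get_priority
def pvGetPriority (task : List (String × String)) : Int :=
  let task_desc := PySem.Str.lower ((PySem.Dict.mk task).getD "task" "")
  let tool_hint := PySem.Str.lower ((PySem.Dict.mk task).getD "tool_hint" "")
  let combined := task_desc ++ " " ++ tool_hint
  pvFirstMatch pvPriorityOrder combined

def rank_priorities (subtasks : List (List (String × String))) : List (List (String × String)) :=
  PySem.List.sorted subtasks pvGetPriority

-- ===== PORT B =====
-- Source B's GROUPS tuple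
def pvGroups : List (Int × List String) :=
  [(1, ["search", "gather", "collect", "fetch"]),
   (2, ["analyze", "calculate", "compute", "process"]),
   (3, ["generate", "write", "create", "output"])]

-- Source B's 'for p, keywords in GROUPS: if any(kw in combined for kw in keywords): return p'
def pvGroupScan : List (Int × List String) → String → Int
  | [], _ => 2
  | (p, kws) :: rest, combined =>
      if kws.any (fun kw => PySem.Str.isIn kw combined) then p
      else pvGroupScan rest combined

-- Source B's _priority
def pvPriorityB (task : List (String × String)) : Int :=
  let combined :=
    PySem.Str.lower ((PySem.Dict.mk task).getD "task" "") ++ " " ++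
    PySem.Str.lower ((PySem.Dict.mk task).getD "tool_hint" "")
  pvGroupScan pvGroups combined

-- three staged filter comprehensions, concatenated
def rank_priorities_alt (subtasks : List (List (String × String))) : List (List (String × String)) :=
  (subtasks.filter (fun t => pvPriorityB t == 1)) ++
  (subtasks.filter (fun t => pvPriorityB t == 2)) ++
  (subtasks.filter (fun t => pvPriorityB t == 3))

-- ===== PRECONDITION & SPEC =====
def Spec_rank_priorities (subtasks : List (List (String × String))) (out : List (List (String × String))) : Prop := out = rank_priorities_alt subtasks
instance (subtasks : List (List (String × String))) (out : List (List (String × String))) : Decidable (Spec_rank_priorities subtasks out) := by unfold Spec_rank_priorities; infer_instance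

-- ===== CLAIM (what is proved, stated in full; the proofs are below) =====
def Claim_equal_rank_priorities : Prop := ∀ (subtasks : List (List (String × String))), Dom_rank_priorities subtasks → Spec_rank_priorities subtasks (rank_priorities subtasks)

-- ===== LEMMAS AND PROOFS =====

-- one group as a segment of A's flat keyword list
theorem pvFirstMatch_map_append (kws : List String) (p : Int) (rest : List (String × Int)) (c : String) :
    pvFirstMatch (kws.map (fun k => (k, p)) ++ rest) c
      = if kws.any (fun kw => PySem.Str.isIn kw c) then p else pvFirstMatch rest c := by
  induction kws with
  | nil => simp
  | cons kw kws ih =>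
      simp only [List.map_cons, List.cons_append, pvFirstMatch, List.any_cons, Bool.or_eq_true, ih]
      by_cases h : PySem.Chars.isIn kw.toList c.toList <;> simp [h]


-- B's grouped scan equals A's flat scan
theorem pvGroupScan_eq (grps : List (Int × List String)) (c : String) :
    pvGroupScan grps c
      = pvFirstMatch (grps.flatMap (fun g => g.2.map (fun k => (k, g.1)))) c := by
  induction grps with
  | nil => rfl
  | cons g rest ih =>
      obtain ⟨p, kws⟩ := g
      simp only [pvGroupScan, List.flatMap_cons, pvFirstMatch_map_append, ih]

theorem pvPriorityB_eq (t : List (String × String)) : pvPriorityB t = pvGetPriority t := by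
  unfold pvPriorityB pvGetPriority
  rw [pvGroupScan_eq]
  rfl

-- get_priority only ever returns 1, 2 or 3
theorem pvFirstMatch_mem (l : List (String × Int)) (c : String) :
    pvFirstMatch l c = 2 ∨ pvFirstMatch l c ∈ l.map (·.2) := by
  induction l with
  | nil => left; rfl
  | cons kp rest ih =>
      obtain ⟨kw, p⟩ := kp
      simp only [pvFirstMatch]
      by_cases h : PySem.Str.isIn kw c
      · rw [if_pos h]; right; simp
      · rw [if_neg h]
        rcases ih with ih | ih
        · left; exact ih
        · right
          simp only [List.map_cons]
          exact List.mem_cons_of_mem _ ih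

theorem pvFirstMatch_po_range (c : String) :
    pvFirstMatch pvPriorityOrder c = 1 ∨ pvFirstMatch pvPriorityOrder c = 2 ∨
      pvFirstMatch pvPriorityOrder c = 3 := by
  have h := pvFirstMatch_mem pvPriorityOrder c
  generalize pvFirstMatch pvPriorityOrder c = x at h ⊢
  rcases h with h | h
  · right; left; exact h
  · simp [pvPriorityOrder] at h
    omega

theorem pvGetPriority_range (t : List (String × String)) :
    pvGetPriority t = 1 ∨ pvGetPriority t = 2 ∨ pvGetPriority t = 3 :=
  pvFirstMatch_po_range _

-- the three buckets, as filters of the input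
def pvF1 (s : List (List (String × String))) : List (List (String × String)) :=
  s.filter (fun t => pvGetPriority t == 1)
def pvF2 (s : List (List (String × String))) : List (List (String × String)) :=
  s.filter (fun t => pvGetPriority t == 2)
def pvF3 (s : List (List (String × String))) : List (List (String × String)) :=
  s.filter (fun t => pvGetPriority t == 3)

theorem insertBy_append_not {α : Type} (b : α → α → Bool) (x : α) (l m : List α)
    (h : ∀ y ∈ l, b x y = false) :
    PySem.List.insertBy b x (l ++ m) = l ++ PySem.List.insertBy b x m := by
  induction l with
  | nil => simp
  | cons y ys ih =>
      have hy := h y (List.mem_cons_self)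
      simp [PySem.List.insertBy, hy, ih (fun z hz => h z (List.mem_cons_of_mem _ hz))]

theorem insertBy_all_before {α : Type} (b : α → α → Bool) (x : α) (l : List α)
    (h : ∀ y ∈ l, b x y = true) :
    PySem.List.insertBy b x l = x :: l := by
  cases l with
  | nil => rfl
  | cons y ys => simp [PySem.List.insertBy, h y (by simp)]

-- inserting one element into the bucket concatenation moves it to the end of its bucket
theorem insert_step (s : List (List (String × String))) (x : List (String × String)) :
    PySem.List.insertBy (fun a b => decide (pvGetPriority a < pvGetPriority b)) x
      (pvF1 s ++ pvF2 s ++ pvF3 s)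
    = pvF1 (s ++ [x]) ++ pvF2 (s ++ [x]) ++ pvF3 (s ++ [x]) := by
  have h1 : ∀ y ∈ pvF1 s, pvGetPriority y = 1 := by
    intro y hy; simpa [pvF1] using (List.of_mem_filter hy)
  have h2 : ∀ y ∈ pvF2 s, pvGetPriority y = 2 := by
    intro y hy; simpa [pvF2] using (List.of_mem_filter hy)
  have h3 : ∀ y ∈ pvF3 s, pvGetPriority y = 3 := by
    intro y hy; simpa [pvF3] using (List.of_mem_filter hy)
  rcases pvGetPriority_range x with hx | hx | hx
  · rw [List.append_assoc,
        insertBy_append_not _ _ _ _ (by intro y hy; simp [h1 y hy, hx]),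
        insertBy_all_before _ _ _ (by
          intro y hy
          rcases List.mem_append.mp hy with hy | hy
          · simp [h2 y hy, hx]
          · simp [h3 y hy, hx])]
    simp [pvF1, pvF2, pvF3, hx]
  · rw [List.append_assoc,
        insertBy_append_not _ _ _ _ (by intro y hy; simp [h1 y hy, hx]),
        insertBy_append_not _ _ _ _ (by intro y hy; simp [h2 y hy, hx]),
        insertBy_all_before _ _ _ (by intro y hy; simp [h3 y hy, hx])]
    simp [pvF1, pvF2, pvF3, hx]
  · rw [List.append_assoc,
        insertBy_append_not _ _ _ _ (by intro y hy; simp [h1 y hy, hx]),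
        insertBy_append_not _ _ _ _ (by intro y hy; simp [h2 y hy, hx]),
        PySem.List.insertBy_of_forall_not_before _ _ _ (by intro y hy; simp [h3 y hy, hx])]
    simp [pvF1, pvF2, pvF3, hx]

-- A's sort is the bucket concatenation
theorem sorted_eq_buckets (s : List (List (String × String))) :
    PySem.List.sorted s pvGetPriority = pvF1 s ++ pvF2 s ++ pvF3 s := by
  rw [PySem.List.sorted_eq_foldl_insertBy]
  induction s using List.reverseRecOn with
  | nil => simp [pvF1, pvF2, pvF3]
  | append_singleton s x ih =>
      rw [List.foldl_append, List.foldl_cons, List.foldl_nil, ih, insert_step]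

-- ===== VERDICT (by name: the statement is the Claim_ definition above) =====
theorem rank_priorities_spec : Claim_equal_rank_priorities := by
  intro subtasks _
  unfold Spec_rank_priorities rank_priorities rank_priorities_alt
  rw [sorted_eq_buckets]
  simp [pvF1, pvF2, pvF3, pvPriorityB_eq]
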